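-- pv_equiv track=rewrite | github.com/kvsankar/dryscope | dryscope/docs/chunker.py | _markdown_sections
-- ===== SOURCE A (Python) =====
-- def _markdown_sections(
--     headings: list[tuple[int, str, int]],
--     heading_lines: list[int],
--     lines: list[str],
-- ) -> list[tuple[list[str], int, int]]:
--     """Build heading-path sections from source heading locations."""
--     sections: list[tuple[list[str], int, int]] = []
--     heading_stack: list[tuple[int, str]] = []
--     total_lines = len(lines)
--
--     first_heading_line = heading_lines[0]
--     if first_heading_line > 0:
--         pre_content = "\n".join(lines[:first_heading_line]).strip()
--         if pre_content:
--             sections.append(([], 1, first_heading_line))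
--
--     for i, (level, h_text, _ast_idx) in enumerate(headings):
--         while heading_stack and heading_stack[-1][0] >= level:
--             heading_stack.pop()
--         heading_stack.append((level, h_text))
--
--         heading_path = [f"{'#' * lvl} {txt}" for lvl, txt in heading_stack]
--         line_start = heading_lines[i] + 1
--         line_end = heading_lines[i + 1] if i + 1 < len(headings) else total_lines
--         sections.append((heading_path, line_start, line_end))
--
--     return sections
-- ===== SOURCE B (Python) =====
-- def _markdown_sections(
--     headings: list[tuple[int, str, int]],
--     heading_lines: list[int],
--     lines: list[str],
-- ) -> list[tuple[list[str], int, int]]: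
--     """Build heading-path sections; stateless per-heading backward scan instead of a mutated stack."""
--     total_lines = len(lines)
--     first_heading_line = heading_lines[0]
--     pre: list[tuple[list[str], int, int]] = []
--     if first_heading_line > 0 and "\n".join(lines[:first_heading_line]).strip():
--         pre = [([], 1, first_heading_line)]
--
--     def path_at(i: int) -> list[str]:
--         level = headings[i][0]
--         chain = [(level, headings[i][1])]
--         bound = level
--         for j in range(i - 1, -1, -1):
--             lj = headings[j][0]
--             if lj < bound:
--                 chain.append((lj, headings[j][1]))
--                 bound = lj
--         return ["#" * lvl + " " + txt for lvl, txt in reversed(chain)]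
--
--     return pre + [
--         (
--             path_at(i),
--             heading_lines[i] + 1,
--             heading_lines[i + 1] if i + 1 < len(headings) else total_lines,
--         )
--         for i in range(len(headings))
--     ]
-- ===== Notes on version B (the rewrite author's own statement) =====
-- stated objective: alternative
-- what changed: Replaces the mutated monotone heading_stack (pop-while >= level, push, snapshot) with a stateless per-heading backward scan that rebuilds each heading path directly from the preceding headings, keeping the pre-content block as-is.
import Mathlib
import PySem

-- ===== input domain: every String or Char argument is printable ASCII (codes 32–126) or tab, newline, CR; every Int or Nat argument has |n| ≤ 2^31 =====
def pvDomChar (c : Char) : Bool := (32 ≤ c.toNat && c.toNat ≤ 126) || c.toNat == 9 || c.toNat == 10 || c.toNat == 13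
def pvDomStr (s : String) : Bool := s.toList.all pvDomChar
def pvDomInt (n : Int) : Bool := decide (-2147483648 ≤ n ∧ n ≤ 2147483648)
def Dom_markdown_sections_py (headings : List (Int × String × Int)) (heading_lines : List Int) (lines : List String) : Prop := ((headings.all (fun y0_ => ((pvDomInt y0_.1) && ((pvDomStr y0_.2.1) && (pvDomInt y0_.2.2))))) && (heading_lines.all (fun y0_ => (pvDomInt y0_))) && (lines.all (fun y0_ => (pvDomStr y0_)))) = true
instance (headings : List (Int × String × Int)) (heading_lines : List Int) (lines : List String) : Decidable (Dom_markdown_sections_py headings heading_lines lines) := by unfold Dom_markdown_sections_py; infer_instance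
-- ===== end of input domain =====

-- B replaces A's mutated monotone heading stack by a stateless per-heading backward scan
-- over the preceding headings (objective: alternative; same observable results).

-- shared formatter for f"{'#' * lvl} {txt}" (exact: '#'*lvl is empty for lvl ≤ 0)
def pvFmt (p : Int × String) : String :=
  String.ofList (PySem.List.pyRepeat ['#'] p.1 ++ ' ' :: p.2.toList)

-- ===== PORT A =====
-- 'while heading_stack and heading_stack[-1][0] >= level: heading_stack.pop()'
def popGE (s : List (Int × String)) (l : Int) : List (Int × String) :=
  match hLast : s.getLast? with
  | none => s
  | some p => if p.1 ≥ l then popGE s.dropLast l else s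
termination_by s.length
decreasing_by
  have hne : s ≠ [] := by intro e; subst e; simp at hLast
  have := List.length_pos_iff.mpr hne
  simp [List.length_dropLast]; omega

-- the 'for i, (level, h_text, _ast_idx) in enumerate(headings)' loop, state = (sections, heading_stack)
def loopA (headings : List (Int × String × Int)) (heading_lines : List Int) (total : Int) :
    List (Int × (Int × String × Int)) → List (List String × Int × Int) → List (Int × String) →
    List (List String × Int × Int)
  | [], sections, _ => sections
  | (i, h) :: rest, sections, stack =>
      let stack' := popGE stack h.1 ++ [(h.1, h.2.1)]
      let path := stack'.map pvFmt
      let ls := PySem.List.pyGetD heading_lines i 0 + 1   -- in range under Pre_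
      let le := if i + 1 < (headings.length : Int) then PySem.List.pyGetD heading_lines (i + 1) 0
                else total
      loopA headings heading_lines total rest (sections ++ [(path, ls, le)]) stack'

def markdown_sections_py (headings : List (Int × String × Int)) (heading_lines : List Int) (lines : List String) : List (List String × Int × Int) :=
  let total : Int := (lines.length : Int)
  let first := PySem.List.pyGetD heading_lines 0 0       -- heading_lines[0]; nonempty under Pre_
  let sections : List (List String × Int × Int) :=
    if first > 0 then
      if PySem.Str.strip (PySem.Str.join "\n" (PySem.List.slice lines none (some first))) ≠ ""
      then [([], 1, first)] else []
    else []
  loopA headings heading_lines total (PySem.List.enumerate headings 0) sections []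

-- ===== PORT B =====
-- Source B's inner 'for j in range(i-1, -1, -1)' walk, state = (chain, bound); traverses the
-- reversed prefix, which visits exactly headings[i-1], …, headings[0] in Source B's order
def chainLoop : List (Int × String × Int) → List (Int × String) → Int → List (Int × String)
  | [], acc, _ => acc
  | h :: rest, acc, b =>
      if h.1 < b then chainLoop rest (acc ++ [(h.1, h.2.1)]) h.1 else chainLoop rest acc b

def pathAt (headings : List (Int × String × Int)) (i : Nat) (level : Int) (txt : String) : List String :=
  ((chainLoop ((headings.take i).reverse) [(level, txt)] level).reverse).map pvFmt

def markdown_sections_py_alt (headings : List (Int × String × Int)) (heading_lines : List Int) (lines : List String) : List (List String × Int × Int) :=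
  let total : Int := (lines.length : Int)
  let first := PySem.List.pyGetD heading_lines 0 0
  let pre : List (List String × Int × Int) :=
    if first > 0 ∧ PySem.Str.strip (PySem.Str.join "\n" (PySem.List.slice lines none (some first))) ≠ ""
    then [([], 1, first)] else []
  pre ++ (PySem.List.enumerate headings 0).map (fun p =>
    (pathAt headings p.1.toNat p.2.1 p.2.2.1,
     PySem.List.pyGetD heading_lines p.1 0 + 1,
     if p.1 + 1 < (headings.length : Int) then PySem.List.pyGetD heading_lines (p.1 + 1) 0
     else total))

-- ===== PRECONDITION & SPEC =====
-- A raises IndexError on heading_lines[0] when heading_lines is empty, and on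
-- heading_lines[i] / heading_lines[i+1] when heading_lines is shorter than headings;
-- exactly those inputs are excluded (B raises there too).
def Pre_markdown_sections_py (headings : List (Int × String × Int)) (heading_lines : List Int) (lines : List String) : Prop :=
  heading_lines ≠ [] ∧ headings.length ≤ heading_lines.length
instance (headings : List (Int × String × Int)) (heading_lines : List Int) (lines : List String) : Decidable (Pre_markdown_sections_py headings heading_lines lines) := by unfold Pre_markdown_sections_py; infer_instance

def pvWitness_markdown_sections_py : (List (Int × String × Int)) × List Int × List String :=
  ([(1, "a", 0), (2, "b", 1)], [1, 3, 5], ["intro", "# a", "x", "## b", "y"])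

def Spec_markdown_sections_py (headings : List (Int × String × Int)) (heading_lines : List Int) (lines : List String) (out : List (List String × Int × Int)) : Prop := out = markdown_sections_py_alt headings heading_lines lines
instance (headings : List (Int × String × Int)) (heading_lines : List Int) (lines : List String) (out : List (List String × Int × Int)) : Decidable (Spec_markdown_sections_py headings heading_lines lines out) := by unfold Spec_markdown_sections_py; infer_instance

-- ===== CLAIM (what is proved, stated in full; the proofs are below) =====
def Claim_equal_markdown_sections_py : Prop := ∀ (headings : List (Int × String × Int)) (heading_lines : List Int) (lines : List String), Dom_markdown_sections_py headings heading_lines lines → Pre_markdown_sections_py headings heading_lines lines → Spec_markdown_sections_py headings heading_lines lines (markdown_sections_py headings heading_lines lines)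

-- ===== LEMMAS AND PROOFS =====

-- non-accumulating form of chainLoop
def back : List (Int × String × Int) → Int → List (Int × String)
  | [], _ => []
  | h :: rest, b => if h.1 < b then (h.1, h.2.1) :: back rest h.1 else back rest b

lemma chainLoop_eq : ∀ (xs : List (Int × String × Int)) (acc : List (Int × String)) (b : Int),
    chainLoop xs acc b = acc ++ back xs b := by
  intro xs
  induction xs with
  | nil => intro acc b; simp [chainLoop, back]
  | cons h rest ih =>
      intro acc b
      by_cases hb : h.1 < b <;> simp [chainLoop, back, hb, ih]

-- A's stack after processing a prefix of headings
def stackOf (hs : List (Int × String × Int)) : List (Int × String) :=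
  hs.foldl (fun s h => popGE s h.1 ++ [(h.1, h.2.1)]) []

lemma popGE_nil (l : Int) : popGE [] l = [] := by
  rw [popGE.eq_def]; simp

lemma popGE_concat (s : List (Int × String)) (p : Int × String) (l : Int) :
    popGE (s ++ [p]) l = if p.1 ≥ l then popGE s l else s ++ [p] := by
  rw [popGE.eq_def]
  split
  · next heq => simp at heq
  · next q heq =>
      obtain rfl : q = p := by simpa using heq.symm
      simp

lemma popGE_popGE (s : List (Int × String)) (l l0 : Int) (h : l ≤ l0) :
    popGE (popGE s l0) l = popGE s l := by
  induction s using List.reverseRecOn with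
  | nil => simp [popGE_nil]
  | append_singleton s' p ih =>
      rw [popGE_concat s' p l0]
      by_cases h0 : p.1 ≥ l0
      · simp only [h0, if_pos]
        rw [ih, popGE_concat]
        have : p.1 ≥ l := le_trans h h0
        simp [this]
      · simp only [h0, if_neg, not_false_iff]

lemma popGE_stackOf (hs : List (Int × String × Int)) :
    ∀ l, popGE (stackOf hs) l = (back hs.reverse l).reverse := by
  induction hs using List.reverseRecOn with
  | nil => intro l; simp [stackOf, popGE_nil, back]
  | append_singleton hs' x ih =>
      intro l
      have hst : stackOf (hs' ++ [x]) = popGE (stackOf hs') x.1 ++ [(x.1, x.2.1)] := by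
        simp [stackOf, List.foldl_append]
      rw [hst, popGE_concat]
      simp only [List.reverse_append, List.reverse_singleton, List.singleton_append, back]
      by_cases hx : x.1 < l
      · have : ¬ x.1 ≥ l := by omega
        simp [this, hx, ih]
      · have hge : x.1 ≥ l := by omega
        have hle : l ≤ x.1 := hge
        simp only [hge, if_pos, hx, if_neg, not_false_iff]
        rw [popGE_popGE _ _ _ hle, ih]

lemma stack_concat (hs : List (Int × String × Int)) (x : Int × String × Int) :
    stackOf (hs ++ [x]) = popGE (stackOf hs) x.1 ++ [(x.1, x.2.1)] := by
  simp [stackOf, List.foldl_append]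

lemma stack_path (hs : List (Int × String × Int)) (level : Int) (txt : String) :
    popGE (stackOf hs) level ++ [(level, txt)]
      = (chainLoop hs.reverse [(level, txt)] level).reverse := by
  rw [chainLoop_eq, popGE_stackOf]
  simp

-- the main loop invariant: if the stack is A's stack for the processed prefix,
-- loopA returns the accumulated sections followed by B's per-index sections
lemma loopA_eq (headings : List (Int × String × Int)) (hl : List Int) (total : Int) :
    ∀ (d : List (Int × String × Int)) (k : Nat) (secs : List (List String × Int × Int)),
      headings.drop k = d →
      loopA headings hl total (PySem.List.enumerate d (k : Int)) secs (stackOf (headings.take k))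
        = secs ++ (PySem.List.enumerate d (k : Int)).map (fun p =>
            (pathAt headings p.1.toNat p.2.1 p.2.2.1,
             PySem.List.pyGetD hl p.1 0 + 1,
             if p.1 + 1 < (headings.length : Int) then PySem.List.pyGetD hl (p.1 + 1) 0
             else total)) := by
  intro d
  induction d with
  | nil =>
      intro k secs _
      simp [PySem.List.enumerate, loopA]
  | cons x d' ih =>
      intro k secs hd
      have hgetk : headings[k]? = some x := by
        have : (headings.drop k)[0]? = some x := by rw [hd]; simp
        simpa using this
      have htake : headings.take (k + 1) = headings.take k ++ [x] := by
        rw [List.take_add_one, hgetk]; simp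
      have hdrop : headings.drop (k + 1) = d' := by
        have : headings.drop (k + 1) = (headings.drop k).drop 1 := by
          rw [List.drop_drop]
        rw [this, hd]; simp
      have hstack : popGE (stackOf (headings.take k)) x.1 ++ [(x.1, x.2.1)]
          = stackOf (headings.take (k + 1)) := by
        rw [htake, stack_concat]
      have hpath : (popGE (stackOf (headings.take k)) x.1 ++ [(x.1, x.2.1)]).map pvFmt
          = pathAt headings k x.1 x.2.1 := by
        rw [stack_path, pathAt]
      rw [PySem.List.enumerate_cons]
      simp only [loopA]
      rw [hpath, hstack]
      have hik : ((k : Int) + 1) = ((k + 1 : Nat) : Int) := by push_cast; ring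
      rw [hik, ih (k + 1) _ hdrop]
      simp

theorem markdown_sections_py_spec_aux (headings : List (Int × String × Int))
    (heading_lines : List Int) (lines : List String) :
    markdown_sections_py headings heading_lines lines
      = markdown_sections_py_alt headings heading_lines lines := by
  unfold markdown_sections_py markdown_sections_py_alt
  have h0 : stackOf (headings.take 0) = [] := by simp [stackOf]
  have := loopA_eq headings heading_lines (lines.length : Int) headings 0
    (if PySem.List.pyGetD heading_lines 0 0 > 0 then
       if PySem.Str.strip (PySem.Str.join "\n" (PySem.List.slice lines none (some (PySem.List.pyGetD heading_lines 0 0)))) ≠ ""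
       then [([], 1, PySem.List.pyGetD heading_lines 0 0)] else []
     else []) (by simp)
  rw [h0] at this
  simp only [Int.natCast_zero] at this
  rw [this]
  congr 1
  -- the pre-content block: nested ifs vs a single conjunction
  by_cases h1 : PySem.List.pyGetD heading_lines 0 0 > 0 <;>
    by_cases h2 : PySem.Str.strip (PySem.Str.join "\n" (PySem.List.slice lines none (some (PySem.List.pyGetD heading_lines 0 0)))) ≠ "" <;>
    simp [h1, h2]

-- ===== VERDICT (by name: the statement is the Claim_ definition above) =====
theorem markdown_sections_py_spec : Claim_equal_markdown_sections_py := by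
  intro headings heading_lines lines _ _
  exact markdown_sections_py_spec_aux headings heading_lines lines
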